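-- pv_equiv track=rewrite | github.com/VojtechNebes/terminal-tic-tac-toe | others/data.py | splitExtraData
-- ===== SOURCE A (Python) =====
-- def splitExtraData(data, sep):
--     try:
--         splitPos = data.index(sep) + 1
--     except ValueError:
--         return [], data
--     else:
--         unpackedData = [data[:splitPos]]
--         moreUnpackedData, rest = splitExtraData(data[splitPos:], sep)
--
--         unpackedData.extend(moreUnpackedData)
--
--         return unpackedData, rest
-- ===== SOURCE B (Python) =====
-- def splitExtraData(data, sep):
--     result = []
--     current = data
--     while True:
--         try:
--             pos = current.index(sep) + 1
--         except ValueError: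
--             return result, current
--         result.append(current[:pos])
--         current = current[pos:]
-- ===== Notes on version B (the rewrite author's own statement) =====
-- stated objective: simpler
-- what changed: Replaced A's recursion (which builds each result by extending a fresh list with the recursive call's chunks) with a single iterative loop that appends chunks to one accumulator list and carries the shrinking remainder.
import Mathlib
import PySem

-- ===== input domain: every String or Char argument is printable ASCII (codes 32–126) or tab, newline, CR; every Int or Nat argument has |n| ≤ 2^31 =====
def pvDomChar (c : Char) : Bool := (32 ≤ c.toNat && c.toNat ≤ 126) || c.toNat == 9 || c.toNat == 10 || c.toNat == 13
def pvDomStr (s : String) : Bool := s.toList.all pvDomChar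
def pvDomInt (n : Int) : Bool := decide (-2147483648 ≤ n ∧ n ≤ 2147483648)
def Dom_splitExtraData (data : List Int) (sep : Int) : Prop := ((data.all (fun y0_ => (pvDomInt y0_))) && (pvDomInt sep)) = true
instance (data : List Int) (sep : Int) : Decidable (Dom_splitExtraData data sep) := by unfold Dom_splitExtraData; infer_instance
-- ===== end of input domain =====

-- B replaces A's recursion by one iterative loop with an accumulator of chunks (simpler decomposition; return value only).
-- ===== PORT A =====
-- A: try data.index(sep) -> recurse on data[splitPos:], prepend data[:splitPos].
def splitExtraData (data : List Int) (sep : Int) : List (List Int) × List Int :=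
  match h : PySem.List.index? data sep with
  | none => ([], data)
  | some i =>
    let splitPos : Int := (i : Int) + 1
    let unpackedHead := PySem.List.slice data none (some splitPos)
    let r := splitExtraData (PySem.List.slice data (some splitPos) none) sep
    (unpackedHead :: r.1, r.2)
termination_by data.length
decreasing_by
  obtain ⟨hk, _, _⟩ := PySem.List.getElem_of_index?_eq_some h
  have : PySem.List.slice data (some ((i : Int) + 1)) none = data.drop (i + 1) := by
    have := PySem.List.slice_from_natCast data (i + 1)
    simpa [Int.natCast_add] using this
  simp [this, List.length_drop]
  omega

-- ===== PORT B =====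
-- B: while-loop with accumulator; result.append(current[:pos]); current = current[pos:].
def splitLoopB (current : List Int) (sep : Int) (result : List (List Int)) : List (List Int) × List Int :=
  match h : PySem.List.index? current sep with
  | none => (result.reverse, current)
  | some i =>
    let pos : Int := (i : Int) + 1
    splitLoopB (PySem.List.slice current (some pos) none) sep
      (PySem.List.slice current none (some pos) :: result)
termination_by current.length
decreasing_by
  obtain ⟨hk, _, _⟩ := PySem.List.getElem_of_index?_eq_some h
  have : PySem.List.slice current (some ((i : Int) + 1)) none = current.drop (i + 1) := by
    have := PySem.List.slice_from_natCast current (i + 1)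
    simpa [Int.natCast_add] using this
  simp [this, List.length_drop]
  omega

def splitExtraData_alt (data : List Int) (sep : Int) : List (List Int) × List Int :=
  splitLoopB data sep []

-- ===== PRECONDITION & SPEC =====
def Spec_splitExtraData (data : List Int) (sep : Int) (out : List (List Int) × List Int) : Prop := out = splitExtraData_alt data sep
instance (data : List Int) (sep : Int) (out : List (List Int) × List Int) : Decidable (Spec_splitExtraData data sep out) := by unfold Spec_splitExtraData; infer_instance

-- ===== CLAIM (what is proved, stated in full; the proofs are below) =====
def Claim_equal_splitExtraData : Prop := ∀ (data : List Int) (sep : Int), Dom_splitExtraData data sep → Spec_splitExtraData data sep (splitExtraData data sep)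

-- ===== LEMMAS AND PROOFS =====

-- ===== VERDICT (by name: the statement is the Claim_ definition above) =====
-- Loop invariant: the accumulator-based loop computes A's recursive result with acc.reverse prefixed.
theorem splitLoopB_eq (current : List Int) (sep : Int) (result : List (List Int)) :
    splitLoopB current sep result =
      ((result.reverse ++ (splitExtraData current sep).1), (splitExtraData current sep).2) := by
  fun_induction splitLoopB current sep result with
  | case1 current result h =>
    rw [splitExtraData]
    split
    · simp
    · rename_i j heq
      rw [h] at heq
      cases heq
  | case2 current result i h pos ih =>
    rw [splitExtraData]
    split
    · rename_i heq
      rw [h] at heq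
      cases heq
    · rename_i j heq
      rw [h] at heq
      injection heq with e
      subst e
      rw [ih]
      simp
      exact ⟨⟨rfl, rfl⟩, rfl⟩

theorem splitExtraData_spec : Claim_equal_splitExtraData := by
  intro data sep _
  unfold Spec_splitExtraData splitExtraData_alt
  rw [splitLoopB_eq]
  simp
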